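-- pv_equiv track=rewrite | github.com/megrez-alioth/tzb-airport-simulation | ZGGG起飞延误积压分析_基线图和热力图.py | identify_continuous_periods
-- ===== SOURCE A (Python) =====
-- def identify_continuous_periods(hours):
--     """识别连续时段"""
--     if not hours:
--         return []
--
--     continuous_periods = []
--     current_period = [hours[0]]
--
--     for i in range(1, len(hours)):
--         if hours[i] - hours[i-1] == 1:
--             current_period.append(hours[i])
--         else:
--             continuous_periods.append(current_period)
--             current_period = [hours[i]]
--
--     continuous_periods.append(current_period)
--     return continuous_periods
-- ===== SOURCE B (Python) =====
-- def identify_continuous_periods(hours):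
--     """识别连续时段 — right-to-left pass building the result back-to-front."""
--     periods = []
--     for x in reversed(hours):
--         if periods and periods[0][0] - x == 1:
--             periods[0].insert(0, x)
--         else:
--             periods.insert(0, [x])
--     return periods
-- ===== Notes on version B (the rewrite author's own statement) =====
-- stated objective: alternative
-- what changed: B traverses the hours right-to-left and builds the result back-to-front by prepending each hour into the first period (or opening a new first period), instead of A's left-to-right scan with a current-period buffer flushed at each break and once after the loop.
import Mathlib
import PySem

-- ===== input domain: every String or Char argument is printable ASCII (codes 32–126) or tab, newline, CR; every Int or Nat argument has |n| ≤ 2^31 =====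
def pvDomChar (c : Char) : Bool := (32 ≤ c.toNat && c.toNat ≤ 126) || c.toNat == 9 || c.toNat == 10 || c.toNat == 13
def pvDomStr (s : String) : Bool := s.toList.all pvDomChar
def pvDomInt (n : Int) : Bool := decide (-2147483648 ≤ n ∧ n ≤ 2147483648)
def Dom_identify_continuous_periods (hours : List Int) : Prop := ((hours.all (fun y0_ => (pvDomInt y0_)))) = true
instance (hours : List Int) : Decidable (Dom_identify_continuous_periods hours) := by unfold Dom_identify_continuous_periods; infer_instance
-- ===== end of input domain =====

-- B replaces A's left-to-right buffer-and-flush scan by a right-to-left pass that builds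
-- the result back-to-front, prepending each hour into the first period (objective: alternative).

-- ===== PORT A =====
-- A's for-loop over i in range(1, len(hours)): structural recursion over the tail,
-- carrying prev = hours[i-1], the accumulated continuous_periods and current_period.
def aLoop (acc : List (List Int)) (cur : List Int) (prev : Int) : List Int → List (List Int)
  | [] => acc ++ [cur]                                   -- continuous_periods.append(current_period); return
  | x :: t =>
    if x - prev == 1 then aLoop acc (cur ++ [x]) x t     -- current_period.append(hours[i])
    else aLoop (acc ++ [cur]) [x] x t                    -- flush, start new current_period

def identify_continuous_periods (hours : List Int) : List (List Int) :=
  match hours with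
  | [] => []                                             -- if not hours: return []
  | h :: t => aLoop [] [h] h t                           -- current_period = [hours[0]]

-- ===== PORT B =====
-- one step of B's loop body: periods[0][0] is pyGetD g 0 0 (the first period is never
-- empty when reached, so the default is unreachable); insert(0, ...) is list cons.
def bStep (x : Int) (periods : List (List Int)) : List (List Int) :=
  match periods with
  | [] => [[x]]                                          -- 'periods' empty: periods.insert(0, [x])
  | g :: rest =>
    if PySem.List.pyGetD g 0 0 - x == 1 then (x :: g) :: rest   -- periods[0].insert(0, x)
    else [x] :: g :: rest                                       -- periods.insert(0, [x])

def identify_continuous_periods_alt (hours : List Int) : List (List Int) :=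
  hours.reverse.foldl (fun periods x => bStep x periods) []   -- for x in reversed(hours)

-- ===== PRECONDITION & SPEC =====
def Spec_identify_continuous_periods (hours : List Int) (out : List (List Int)) : Prop := out = identify_continuous_periods_alt hours
instance (hours : List Int) (out : List (List Int)) : Decidable (Spec_identify_continuous_periods hours out) := by unfold Spec_identify_continuous_periods; infer_instance

-- ===== CLAIM (what is proved, stated in full; the proofs are below) =====
def Claim_equal_identify_continuous_periods : Prop := ∀ (hours : List Int), Dom_identify_continuous_periods hours → Spec_identify_continuous_periods hours (identify_continuous_periods hours)

-- ===== LEMMAS AND PROOFS =====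

-- canonical characterisation: (run continuing prev, remaining periods)
def chopFrom (prev : Int) : List Int → List Int × List (List Int)
  | [] => ([], [])
  | x :: t =>
    let p := chopFrom x t
    if x - prev == 1 then (x :: p.1, p.2) else ([], (x :: p.1) :: p.2)

def chopTop : List Int → List (List Int)
  | [] => []
  | h :: t => (h :: (chopFrom h t).1) :: (chopFrom h t).2

theorem aLoop_eq (t : List Int) : ∀ (prev : Int) (acc : List (List Int)) (cur : List Int),
    aLoop acc cur prev t = acc ++ (cur ++ (chopFrom prev t).1) :: (chopFrom prev t).2 := by
  induction t with
  | nil => intro prev acc cur; simp [aLoop, chopFrom]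
  | cons x t ih =>
    intro prev acc cur
    by_cases h : x - prev = 1
    · simp [aLoop, chopFrom, h, ih]
    · simp [aLoop, chopFrom, h, ih]

theorem foldr_bStep_eq (l : List Int) : List.foldr bStep [] l = chopTop l := by
  induction l with
  | nil => rfl
  | cons x t ih =>
    rw [List.foldr_cons, ih]
    cases t with
    | nil => rfl
    | cons y t' =>
      by_cases h : y - x = 1
      · simp [chopTop, bStep, chopFrom, PySem.List.pyGetD_zero_cons, h]
      · simp [chopTop, bStep, chopFrom, PySem.List.pyGetD_zero_cons, h]

-- ===== VERDICT (by name: the statement is the Claim_ definition above) =====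
theorem identify_continuous_periods_spec : Claim_equal_identify_continuous_periods := by
  intro hours _
  unfold Spec_identify_continuous_periods identify_continuous_periods_alt
  rw [List.foldl_reverse, foldr_bStep_eq]
  cases hours with
  | nil => rfl
  | cons h t => simp [identify_continuous_periods, aLoop_eq, chopTop]
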